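-- pv_equiv track=rewrite | github.com/studiozandra/blog-template | build.py | strip_title_tags
-- ===== SOURCE A (Python) =====
-- def strip_title_tags(html_ele):
--     clean_title = ''
--     started = False
--     for char in html_ele:
--         if (char == ">" and started == False):
--             started = True
--         if (char == "<" and started == True):
--             started = False
--         if (started == True and (char not in ["<",">","/","\n"])):
--             clean_title += char
--     return clean_title
-- ===== SOURCE B (Python) =====
-- def strip_title_tags(html_ele):
--     parts = []
--     for seg in html_ele.split('<'):
--         parts.extend(seg.split('>')[1:])
--     return ''.join(c for c in ''.join(parts) if c not in '/\n')
-- ===== Notes on version B (the rewrite author's own statement) =====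
-- stated objective: faster
-- what changed: Replaced A's fused char-by-char boolean state machine with a two-phase decomposition: split on the opening tag bracket, keep each segment's text after its first closing tag bracket, join, then filter out the slash and newline characters. The split/join/filter phases run in C instead of a per-character Python loop with string concatenation.
import Mathlib
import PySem

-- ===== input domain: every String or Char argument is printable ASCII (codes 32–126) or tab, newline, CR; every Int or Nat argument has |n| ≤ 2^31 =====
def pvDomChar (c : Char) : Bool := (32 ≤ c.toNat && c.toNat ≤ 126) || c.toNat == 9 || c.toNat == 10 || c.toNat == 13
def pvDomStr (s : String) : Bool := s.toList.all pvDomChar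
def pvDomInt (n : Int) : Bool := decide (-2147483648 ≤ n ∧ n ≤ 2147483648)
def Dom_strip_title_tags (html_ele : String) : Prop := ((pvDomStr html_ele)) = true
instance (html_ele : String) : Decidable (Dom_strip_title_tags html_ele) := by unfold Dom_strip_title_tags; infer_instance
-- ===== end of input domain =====

-- B replaces A's fused char-by-char state machine by a two-phase split decomposition
-- (split on the opening bracket, keep what follows each segment's first closing bracket,
-- then filter the slash and newline characters); objective: idiomatic.

-- ===== PORT A =====
-- A's loop body: the two started-updates in source order, then the conditional append.
def pvStepA (st : List Char × Bool) (char : Char) : List Char × Bool :=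
  let started := if char == '>' && st.2 == false then true else st.2
  let started := if char == '<' && started == true then false else started
  let clean_title :=
    if started == true && !(['<', '>', '/', '\n'].contains char) then st.1 ++ [char] else st.1
  (clean_title, started)

def strip_title_tags (html_ele : String) : String :=
  String.ofList (html_ele.toList.foldl pvStepA ([], false)).1

-- ===== PORT B =====
def strip_title_tags_alt (html_ele : String) : String :=
  let parts : List (List Char) :=
    (PySem.Chars.splitOn html_ele.toList ['<']).foldl
      (fun parts seg => parts ++ (PySem.Chars.splitOn seg ['>']).drop 1) []
  String.ofList ((PySem.Chars.join [] parts).filter (fun c => !(c == '/' || c == '\n')))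

-- ===== PRECONDITION & SPEC =====
def Spec_strip_title_tags (html_ele : String) (out : String) : Prop := out = strip_title_tags_alt html_ele
instance (html_ele : String) (out : String) : Decidable (Spec_strip_title_tags html_ele out) := by unfold Spec_strip_title_tags; infer_instance

-- ===== CLAIM (what is proved, stated in full; the proofs are below) =====
def Claim_equal_strip_title_tags : Prop := ∀ (html_ele : String), Dom_strip_title_tags html_ele → Spec_strip_title_tags html_ele (strip_title_tags html_ele)

-- ===== LEMMAS AND PROOFS =====

-- Proof-side recursive form of PySem.Chars.splitOn for a single-character separator.
def pvSplitAux (sep : Char) : List Char → List Char → List (List Char)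
  | [], cur => [cur.reverse]
  | c :: rest, cur => if c = sep then cur.reverse :: pvSplitAux sep rest [] else pvSplitAux sep rest (c :: cur)

lemma pvGo_eq_splitAux (sep : Char) : ∀ (l cur : List Char) (acc : List (List Char)) (fuel : Nat),
    l.length < fuel →
    PySem.Chars.splitOn.go [sep] fuel l cur acc = acc.reverse ++ pvSplitAux sep l cur := by
  intro l
  induction l with
  | nil =>
    intro cur acc fuel hf
    obtain ⟨f, rfl⟩ : ∃ f, fuel = f + 1 := ⟨fuel - 1, by omega⟩
    simp [PySem.Chars.splitOn.go, pvSplitAux]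
  | cons c rest ih =>
    intro cur acc fuel hf
    obtain ⟨f, rfl⟩ : ∃ f, fuel = f + 1 := ⟨fuel - 1, by omega⟩
    have hr : rest.length < f := by simpa using Nat.lt_of_succ_lt_succ hf
    by_cases h : c = sep
    · subst h
      simp [PySem.Chars.splitOn.go, List.isPrefixOf, pvSplitAux, ih _ _ _ hr]
    · have : ([sep].isPrefixOf (c :: rest)) = false := by
        simp [List.isPrefixOf]; exact fun hcs => h hcs.symm
      simp [PySem.Chars.splitOn.go, this, pvSplitAux, h, ih _ _ _ hr]

lemma pvSplitOn_eq (sep : Char) (cs : List Char) :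
    PySem.Chars.splitOn cs [sep] = pvSplitAux sep cs [] := by
  unfold PySem.Chars.splitOn
  simpa using pvGo_eq_splitAux sep cs [] [] (cs.length + 1) (by omega)

lemma pvSplitAux_acc (sep : Char) : ∀ (cs cur : List Char),
    pvSplitAux sep cs cur = (pvSplitAux sep cs []).modifyHead (cur.reverse ++ ·) := by
  intro cs
  induction cs with
  | nil => intro cur; simp [pvSplitAux]
  | cons c rest ih =>
    intro cur
    by_cases h : c = sep
    · subst h; simp [pvSplitAux]
    · simp only [pvSplitAux, if_neg h, ih (c :: cur), ih [c], List.modifyHead_modifyHead]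
      congr 1; funext x; simp

lemma pvSplitAux_cons_ne (sep c : Char) (cs : List Char) (h : c ≠ sep) :
    pvSplitAux sep (c :: cs) [] = (pvSplitAux sep cs []).modifyHead (c :: ·) := by
  simp only [pvSplitAux, if_neg h]
  simpa using pvSplitAux_acc sep cs [c]

lemma pvSplitAux_cons_sep (sep : Char) (cs : List Char) :
    pvSplitAux sep (sep :: cs) [] = [] :: pvSplitAux sep cs [] := by
  simp [pvSplitAux]

lemma pvSplitAux_ne_nil (sep : Char) (cs cur : List Char) : pvSplitAux sep cs cur ≠ [] := by
  induction cs generalizing cur with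
  | nil => simp [pvSplitAux]
  | cons c rest ih =>
    by_cases h : c = sep
    · simp [pvSplitAux, h]
    · simp only [pvSplitAux, if_neg h]
      exact ih _

lemma pvSplitAux_flatten (sep : Char) : ∀ (cs cur : List Char),
    (pvSplitAux sep cs cur).flatten = cur.reverse ++ cs.filter (fun c => !(c == sep)) := by
  intro cs
  induction cs with
  | nil => intro cur; simp [pvSplitAux]
  | cons c rest ih =>
    intro cur
    by_cases h : c = sep
    · subst h; simp [pvSplitAux, ih]
    · simp [pvSplitAux, ih, h]

-- The machine view of A's fold.
def pvMach : List Char → Bool → List Char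
  | [], _ => []
  | c :: cs, st => (pvStepA ([], st) c).1 ++ pvMach cs (pvStepA ([], st) c).2

lemma pvStepA_acc (acc : List Char) (st : Bool) (c : Char) :
    pvStepA (acc, st) c = (acc ++ (pvStepA ([], st) c).1, (pvStepA ([], st) c).2) := by
  simp only [pvStepA]
  split_ifs <;> simp

lemma pvFoldl_eq_mach : ∀ (cs : List Char) (acc : List Char) (st : Bool),
    (cs.foldl pvStepA (acc, st)).1 = acc ++ pvMach cs st := by
  intro cs
  induction cs with
  | nil => intro acc st; simp [pvMach]
  | cons c rest ih =>
    intro acc st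
    simp only [List.foldl_cons, pvStepA_acc acc st c, pvMach, ih, List.append_assoc]

def pvContrib (seg : List Char) : List Char := ((pvSplitAux '>' seg []).drop 1).flatten
def pvNotSlash (c : Char) : Bool := !(c == '/' || c == '\n')

lemma pvMain : ∀ cs : List Char,
    (pvMach cs false = ((pvSplitAux '<' cs []).flatMap pvContrib).filter pvNotSlash) ∧
    (∀ h t, pvSplitAux '<' cs [] = h :: t →
      pvMach cs true = (h.filter (fun c => !(c == '>'))).filter pvNotSlash
        ++ (t.flatMap pvContrib).filter pvNotSlash) := by
  intro cs
  induction cs with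
  | nil =>
    constructor
    · simp [pvMach, pvSplitAux, pvContrib]
    · intro h t heq
      simp only [pvSplitAux] at heq
      injection heq with e1 e2
      subst e1; subst e2
      simp [pvMach]
  | cons c rest ih =>
    obtain ⟨ihF, ihT⟩ := ih
    rcases hsp : pvSplitAux '<' rest [] with _ | ⟨h, t⟩
    · exact absurd hsp (pvSplitAux_ne_nil _ _ _)
    constructor
    · -- state false
      by_cases hlt : c = '<'
      · subst hlt
        rw [pvSplitAux_cons_sep]
        simp only [pvMach, pvStepA]
        simpa [pvContrib, pvSplitAux] using ihF
      · rw [pvSplitAux_cons_ne _ _ _ hlt, hsp]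
        by_cases hgt : c = '>'
        · subst hgt
          have hc : pvContrib ('>' :: h) = h.filter (fun c => !(c == '>')) := by
            simp [pvContrib, pvSplitAux_cons_sep, pvSplitAux_flatten]
          simp only [pvMach, pvStepA]
          simp only [List.modifyHead_cons, List.flatMap_cons, hc, List.filter_append]
          simpa using ihT h t hsp
        · have hc : pvContrib (c :: h) = pvContrib h := by
            simp [pvContrib, pvSplitAux_cons_ne _ _ _ hgt, ← List.drop_one, List.tail_modifyHead]
          simp only [pvMach, pvStepA]
          have : pvMach rest false = ((h :: t).flatMap pvContrib).filter pvNotSlash := by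
            rw [ihF, hsp]
          simp only [List.modifyHead_cons, List.flatMap_cons, hc, hlt, hgt]
          simp [hlt, hgt, this]
    · -- state true
      intro h' t' heq
      by_cases hlt : c = '<'
      · subst hlt
        rw [pvSplitAux_cons_sep] at heq
        injection heq with e1 e2
        simp only [pvMach, pvStepA]
        simp only [← e1, ← e2, List.filter_nil, List.nil_append]
        simpa using ihF
      · rw [pvSplitAux_cons_ne _ _ _ hlt, hsp] at heq
        simp only [List.modifyHead_cons] at heq
        injection heq with e1 e2
        by_cases hgt : c = '>'
        · subst hgt
          simp only [pvMach, pvStepA]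
          simp only [← e1, ← e2]
          simpa using ihT h t hsp
        · simp only [pvMach, pvStepA]
          simp only [← e1, ← e2]
          have := ihT h t hsp
          simp only [hlt, hgt] at this ⊢
          simp [hlt, hgt, this, pvNotSlash]
          split_ifs <;> simp_all [pvNotSlash]
  
lemma pvJoin_nil_eq_flatten (l : List (List Char)) : PySem.Chars.join [] l = l.flatten := by
  simp only [PySem.Chars.join]
  induction l with
  | nil => simp [List.intercalate]
  | cons x xs ih =>
    cases xs with
    | nil => simp [List.intercalate]
    | cons y ys => simp_all [List.intercalate, List.intersperse]

-- ===== VERDICT (by name: the statement is the Claim_ definition above) =====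
theorem strip_title_tags_spec : Claim_equal_strip_title_tags := by
  intro s _
  unfold Spec_strip_title_tags strip_title_tags strip_title_tags_alt
  rw [PySem.List.foldl_append_eq_flatMap]
  simp only [List.nil_append, pvJoin_nil_eq_flatten, pvFoldl_eq_mach, List.nil_append]
  congr 1
  rw [(pvMain s.toList).1, pvSplitOn_eq '<']
  have hfl : ∀ (l : List (List Char)) (f : List Char → List (List Char)),
      (l.flatMap f).flatten = l.flatMap fun x => (f x).flatten := by
    intro l f
    induction l with
    | nil => simp
    | cons x xs ih => simp [ih]
  rw [hfl]
  unfold pvNotSlash pvContrib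
  simp only [pvSplitOn_eq]
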